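-- pv_equiv track=rewrite | github.com/aaronmussig/Indizio | indizio/utils.py | sort_gene_names
-- ===== SOURCE A (Python) =====
-- def sort_gene_names(gene_names):
--     terminals = set( [gene[-1] for gene in gene_names] )
--     sets = {k: [] for k in terminals}
--     for gene in gene_names:
--         sets[gene[-1]].append(gene)
--
--     sorted_genes = []
--     for key in sorted(sets.keys()):
--         for gene in sorted(sets[key]):
--             sorted_genes.append(gene)
--     return sorted_genes
-- ===== SOURCE B (Python) =====
-- def sort_gene_names(gene_names):
--     return sorted(gene_names, key=lambda g: (g[-1], g))
-- ===== Notes on version B (the rewrite author's own statement) =====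
-- stated objective: simpler
-- what changed: Replaces the terminal-set, bucket-dict and per-bucket sorts with a single stable sort on the composite key (last character, full string).
import Mathlib
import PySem

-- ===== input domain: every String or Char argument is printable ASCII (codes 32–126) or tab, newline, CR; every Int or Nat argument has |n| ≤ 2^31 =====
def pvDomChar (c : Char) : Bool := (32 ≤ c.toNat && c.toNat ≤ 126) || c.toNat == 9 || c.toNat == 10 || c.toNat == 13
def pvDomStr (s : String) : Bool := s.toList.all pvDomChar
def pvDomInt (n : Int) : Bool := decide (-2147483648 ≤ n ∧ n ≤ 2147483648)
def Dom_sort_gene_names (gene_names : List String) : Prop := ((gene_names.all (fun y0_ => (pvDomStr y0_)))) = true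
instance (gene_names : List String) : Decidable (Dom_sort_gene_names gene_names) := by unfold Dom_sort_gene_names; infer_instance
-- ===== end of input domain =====

-- B replaces A's terminal-set + bucket-dict + per-bucket sorts with one stable sort on
-- the composite key (last character, full string): simpler, same O(n log n) cost.

-- gene[-1]; total stand-in (Pre_ excludes the empty string, where Python raises IndexError)
def pvLastChar (g : String) : Char := (PySem.Str.pyGet? g (-1)).getD ' '

-- ===== PORT A =====
def sort_gene_names (gene_names : List String) : List String :=
  -- terminals = set([gene[-1] for gene in gene_names])
  let terminals : PySem.Set Char := PySem.Set.ofList (gene_names.map pvLastChar)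
  -- sets = {k: [] for k in terminals}
  let sets0 : PySem.Dict Char (List String) :=
    terminals.foldl (fun d k => d.insert k ([] : List String)) PySem.Dict.empty
  -- for gene in gene_names: sets[gene[-1]].append(gene)
  let sets : PySem.Dict Char (List String) :=
    gene_names.foldl (fun d g => d.modify (pvLastChar g) [] (fun v => v ++ [g])) sets0
  -- sorted_genes = []; for key in sorted(sets.keys()): for gene in sorted(sets[key]): append
  let sorted_genes : List String := []
  (PySem.List.sorted sets.keys (fun k => k)).foldl
    (fun acc k =>
      (PySem.List.sorted (sets.getD k []) (fun g => g)).foldl (fun acc g => acc ++ [g]) acc)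
    sorted_genes

-- ===== PORT B =====
def sort_gene_names_alt (gene_names : List String) : List String :=
  -- return sorted(gene_names, key=lambda g: (g[-1], g))
  PySem.List.sorted2 gene_names pvLastChar (fun g => g)

-- ===== PRECONDITION & SPEC =====
-- Pre_ excludes lists containing the empty string, where the Python A raises IndexError on gene[-1] (B raises there too).
def Pre_sort_gene_names (gene_names : List String) : Prop := "" ∉ gene_names
instance (gene_names : List String) : Decidable (Pre_sort_gene_names gene_names) := by unfold Pre_sort_gene_names; infer_instance

def pvWitness_sort_gene_names : List String := ["geneB1", "geneA2", "geneC1", "geneA1"]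

def Spec_sort_gene_names (gene_names : List String) (out : List String) : Prop := out = sort_gene_names_alt gene_names
instance (gene_names : List String) (out : List String) : Decidable (Spec_sort_gene_names gene_names out) := by unfold Spec_sort_gene_names; infer_instance

-- ===== CLAIM (what is proved, stated in full; the proofs are below) =====
def Claim_equal_sort_gene_names : Prop := ∀ (gene_names : List String), Dom_sort_gene_names gene_names → Pre_sort_gene_names gene_names → Spec_sort_gene_names gene_names (sort_gene_names gene_names)

-- ===== LEMMAS AND PROOFS =====

-- the composite key (g[-1], g), encoded as the string g[-1] ++ g so that String's
-- lexicographic order is exactly Python's tuple order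
def pvLexKey (g : String) : String := String.ofList (pvLastChar g :: g.toList)

theorem pvLexKey_injective : Function.Injective pvLexKey := by
  intro a b h
  have h2 : pvLastChar a :: a.toList = pvLastChar b :: b.toList := by
    have := congrArg String.toList h
    simpa [pvLexKey, String.toList_ofList] using this
  exact String.toList_injective ((List.cons.injEq _ _ _ _).mp h2).2

theorem pvLexKey_lt {a b : String} :
    pvLexKey a < pvLexKey b ↔
      (pvLastChar a < pvLastChar b ∨ (pvLastChar a = pvLastChar b ∧ a < b)) := by
  unfold pvLexKey
  rw [String.lt_iff_toList_lt]
  simp only [String.toList_ofList, List.cons_lt_cons_iff]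
  rw [← String.lt_iff_toList_lt]

-- B's port is sorting by pvLexKey
theorem alt_eq_sorted (gs : List String) :
    sort_gene_names_alt gs = PySem.List.sorted gs pvLexKey := by
  have hB : sort_gene_names_alt gs =
      List.foldl (fun acc x => PySem.List.insertBy
        (fun a b => decide (pvLastChar a < pvLastChar b) ||
          (!decide (pvLastChar b < pvLastChar a) && decide (a < b))) x acc) [] gs := rfl
  rw [hB, PySem.List.sorted_eq_foldl_insertBy]
  congr 1
  funext acc x
  congr 1
  funext a b
  rcases lt_trichotomy (pvLastChar a) (pvLastChar b) with h | h | h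
  · have e3 : decide (pvLexKey a < pvLexKey b) = true := by
      rw [decide_eq_true_eq, pvLexKey_lt]
      exact Or.inl h
    rw [e3]
    simp [h]
  · have e3 : decide (pvLexKey a < pvLexKey b) = decide (a < b) := by
      apply decide_eq_decide.mpr
      rw [pvLexKey_lt]
      simp [h]
    rw [e3]
    simp [h]
  · have e3 : decide (pvLexKey a < pvLexKey b) = false := by
      rw [decide_eq_false_iff_not, pvLexKey_lt]
      rintro (h' | ⟨h', _⟩)
      · exact absurd h' (not_lt_of_gt h)
      · exact absurd h' (ne_of_gt h)
    rw [e3]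
    simp [not_lt_of_gt h, h]

-- getD of the all-[] initial dict
theorem getD_init (l : List Char) (d : PySem.Dict Char (List String))
    (hd : ∀ k, d.getD k [] = []) (k : Char) :
    (l.foldl (fun d k => d.insert k ([] : List String)) d).getD k [] = [] := by
  induction l generalizing d with
  | nil => exact hd k
  | cons x xs ih =>
      simp only [List.foldl_cons]
      apply ih
      intro k'
      rw [PySem.Dict.getD_insert]
      split <;> simp [hd]

theorem pvUpdate_of_subset (l : List Char) (s : PySem.Set Char) (h : ∀ x ∈ l, x ∈ s) :
    PySem.Set.update s l = s := by
  induction l generalizing s with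
  | nil => rfl
  | cons x xs ih =>
      rw [PySem.Set.update_cons, PySem.Set.add_of_mem (h x (by simp))]
      exact ih s (fun y hy => h y (List.mem_cons_of_mem _ hy))

-- concatenating the buckets of distinct, exhaustive terminals is a permutation of gs
theorem flatMap_filter_perm (ks : List Char) (gs : List String)
    (hnd : ks.Nodup) (hall : ∀ g ∈ gs, pvLastChar g ∈ ks) :
    (ks.flatMap (fun k => gs.filter (fun g => pvLastChar g == k))).Perm gs := by
  induction ks generalizing gs with
  | nil =>
      cases gs with
      | nil => simp
      | cons g t => exact absurd (hall g (by simp)) (by simp)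
  | cons k ks ih =>
      simp only [List.flatMap_cons]
      have hsplit : (gs.filter (fun g => pvLastChar g == k) ++
          gs.filter (fun g => !(pvLastChar g == k))).Perm gs :=
        List.filter_append_perm _ gs
      refine List.Perm.trans (List.Perm.append_left _ ?_) hsplit
      have hrest : ks.flatMap (fun k' => gs.filter (fun g => pvLastChar g == k'))
          = ks.flatMap (fun k' => (gs.filter (fun g => !(pvLastChar g == k))).filter
            (fun g => pvLastChar g == k')) := by
        apply List.flatMap_congr
        intro k' hk'
        rw [List.filter_filter]
        apply List.filter_congr
        intro g hg
        have hne : k' ≠ k := fun e => (List.nodup_cons.mp hnd).1 (e ▸ hk')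
        by_cases hgk : pvLastChar g = k'
        · simp [hgk, hne]
        · simp [hgk]
      rw [hrest]
      apply ih _ (List.nodup_cons.mp hnd).2
      intro g hg
      have hg' := List.mem_filter.mp hg
      have hmem := hall g hg'.1
      simp only [List.mem_cons] at hmem
      rcases hmem with h | h
      · exact absurd (show (pvLastChar g == k) = true by simp [h]) (by simpa using hg'.2)
      · exact h

-- the concatenation of the sorted buckets, in increasing key order, is pvLexKey-sorted
theorem flatMap_pairwise (ks : List Char) (gs : List String)
    (hks : ks.Pairwise (· < ·)) :
    (ks.flatMap (fun k => PySem.List.sorted (gs.filter (fun g => pvLastChar g == k))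
      (fun g => g))).Pairwise (fun a b => pvLexKey a ≤ pvLexKey b) := by
  rw [List.pairwise_flatMap]
  constructor
  · intro k _
    have hp := PySem.List.sorted_pairwise (gs.filter (fun g => pvLastChar g == k)) (fun g => g)
    apply hp.imp_of_mem
    intro a b ha hb hab
    have ha' := (List.mem_filter.mp ((PySem.List.mem_sorted _ _ _ _).mp ha)).2
    have hb' := (List.mem_filter.mp ((PySem.List.mem_sorted _ _ _ _).mp hb)).2
    have hk : pvLastChar a = pvLastChar b := by
      have h1 : pvLastChar a = k := by simpa using ha'
      have h2 : pvLastChar b = k := by simpa using hb'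
      rw [h1, h2]
    rcases lt_or_eq_of_le hab with h | h
    · exact le_of_lt (pvLexKey_lt.mpr (Or.inr ⟨hk, h⟩))
    · simp [pvLexKey, h]
  · apply hks.imp_of_mem
    intro k k' _ _ hkk' a ha b hb
    have ha' := (List.mem_filter.mp ((PySem.List.mem_sorted _ _ _ _).mp ha)).2
    have hb' := (List.mem_filter.mp ((PySem.List.mem_sorted _ _ _ _).mp hb)).2
    have h1 : pvLastChar a = k := by simpa using ha'
    have h2 : pvLastChar b = k' := by simpa using hb'
    exact le_of_lt (pvLexKey_lt.mpr (Or.inl (by rw [h1, h2]; exact hkk')))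

-- A's port, characterised: sorted terminals, each bucket filtered out of gs and sorted
theorem a_eq (gs : List String) :
    sort_gene_names gs =
      (PySem.List.sorted (PySem.Set.ofList (gs.map pvLastChar)) (fun k => k)).flatMap
        (fun k => PySem.List.sorted (gs.filter (fun g => pvLastChar g == k)) (fun g => g)) := by
  simp only [sort_gene_names]
  have hbucket : ∀ k : Char,
      (gs.foldl (fun d g => d.modify (pvLastChar g) [] (fun v => v ++ [g]))
        ((PySem.Set.ofList (gs.map pvLastChar)).foldl
          (fun d k => d.insert k ([] : List String)) PySem.Dict.empty)).getD k []
      = gs.filter (fun g => pvLastChar g == k) := by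
    intro k
    have hfold : gs.foldl (fun d g => d.modify (pvLastChar g) [] (fun v => v ++ [g]))
        ((PySem.Set.ofList (gs.map pvLastChar)).foldl
          (fun d k => d.insert k ([] : List String)) PySem.Dict.empty)
        = (gs.map (fun g => (pvLastChar g, g))).foldl
            (fun d p => d.modify p.1 [] (fun v => v ++ [p.2]))
            ((PySem.Set.ofList (gs.map pvLastChar)).foldl
              (fun d k => d.insert k ([] : List String)) PySem.Dict.empty) := by
      rw [List.foldl_map]
    rw [hfold, PySem.Dict.getD_foldl_modify_append]
    rw [getD_init _ _ (fun k => by simp [PySem.Dict.getD_empty])]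
    simp [List.filter_map, List.map_map, Function.comp_def]
  have hkeys :
      (gs.foldl (fun d g => d.modify (pvLastChar g) [] (fun v => v ++ [g]))
        ((PySem.Set.ofList (gs.map pvLastChar)).foldl
          (fun d k => d.insert k ([] : List String)) PySem.Dict.empty)).keys
      = PySem.Set.ofList (gs.map pvLastChar) := by
    have h1 : ((PySem.Set.ofList (gs.map pvLastChar)).foldl
        (fun d k => d.insert k ([] : List String)) PySem.Dict.empty).keys
        = PySem.Set.ofList (gs.map pvLastChar) := by
      rw [PySem.Dict.keys_foldl_insert (PySem.Set.ofList (gs.map pvLastChar))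
        (fun _ _ => ([] : List String)) PySem.Dict.empty, PySem.Dict.keys_empty]
      show PySem.Set.update [] _ = _
      rw [PySem.Set.update, ← PySem.Set.ofList_eq_foldl]
      exact PySem.Set.ofList_eq_self_of_nodup _ (PySem.Set.nodup_ofList _)
    rw [PySem.Dict.keys_foldl_modify_key gs pvLastChar ([] : List String)
      (fun _ g v => v ++ [g]), h1]
    apply pvUpdate_of_subset
    intro x hx
    exact (PySem.Set.mem_ofList _ _).mpr hx
  rw [hkeys]
  simp only [PySem.List.foldl_append_singleton_eq_self]
  rw [PySem.List.foldl_append_eq_flatMap]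
  rw [List.nil_append]
  apply List.flatMap_congr
  intro k _
  rw [hbucket k]

-- ===== VERDICT (by name: the statement is the Claim_ definition above) =====
theorem sort_gene_names_spec : Claim_equal_sort_gene_names := by
  intro gs _ _
  show sort_gene_names gs = sort_gene_names_alt gs
  rw [alt_eq_sorted, a_eq]
  have hks := PySem.List.sorted_ofList_pairwise_lt (gs.map pvLastChar)
  apply PySem.List.eq_of_perm_of_pairwise_le_of_injective pvLexKey pvLexKey_injective
  · -- permutation
    have hperm1 : ((PySem.List.sorted (PySem.Set.ofList (gs.map pvLastChar))
        (fun k => k)).flatMap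
        (fun k => PySem.List.sorted (gs.filter (fun g => pvLastChar g == k))
          (fun g => g))).Perm
        ((PySem.List.sorted (PySem.Set.ofList (gs.map pvLastChar)) (fun k => k)).flatMap
        (fun k => gs.filter (fun g => pvLastChar g == k))) :=
      List.Perm.flatMap (List.Perm.refl _)
        (fun k _ => PySem.List.sorted_perm _ _ _)
    refine (hperm1.trans ?_).trans (PySem.List.sorted_perm gs pvLexKey false).symm
    apply flatMap_filter_perm
    · exact hks.nodup
    · intro g hg
      rw [PySem.List.mem_sorted, PySem.Set.mem_ofList]
      exact List.mem_map_of_mem hg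
  · exact flatMap_pairwise _ _ hks
  · exact PySem.List.sorted_pairwise gs pvLexKey
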